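-- pv_equiv track=rewrite | github.com/Neo-sk01/motherduck_EDA | scripts/align_april_excel_report.py | unique_headers
-- ===== SOURCE A (Python) =====
-- from collections import Counter, defaultdict
-- from typing import Any
--
-- def unique_headers(headers: list[Any]) -> list[Any]:
--     seen: dict[str, int] = defaultdict(int)
--     out = []
--     for header in headers:
--         if header is None:
--             out.append(None)
--             continue
--         text = str(header)
--         suffix = seen[text]
--         seen[text] += 1
--         out.append(text if suffix == 0 else f"{text}_{suffix}")
--     return out
-- ===== SOURCE B (Python) =====
-- from collections import defaultdict
--
-- def unique_headers(headers):
--     out = [None] * len(headers)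
--     groups = defaultdict(list)
--     for i, header in enumerate(headers):
--         if header is not None:
--             groups[str(header)].append(i)
--     for text, positions in groups.items():
--         for j, p in enumerate(positions):
--             out[p] = text if j == 0 else f"{text}_{j}"
--     return out
-- ===== Notes on version B (the rewrite author's own statement) =====
-- stated objective: alternative
-- what changed: Replaces A's single stateful pass with a running defaultdict(int) counter by two staged passes: first a position table (text -> list of indices) is built, then a pre-sized output is filled group by group, the rank within each position list giving the suffix.
import Mathlib
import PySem

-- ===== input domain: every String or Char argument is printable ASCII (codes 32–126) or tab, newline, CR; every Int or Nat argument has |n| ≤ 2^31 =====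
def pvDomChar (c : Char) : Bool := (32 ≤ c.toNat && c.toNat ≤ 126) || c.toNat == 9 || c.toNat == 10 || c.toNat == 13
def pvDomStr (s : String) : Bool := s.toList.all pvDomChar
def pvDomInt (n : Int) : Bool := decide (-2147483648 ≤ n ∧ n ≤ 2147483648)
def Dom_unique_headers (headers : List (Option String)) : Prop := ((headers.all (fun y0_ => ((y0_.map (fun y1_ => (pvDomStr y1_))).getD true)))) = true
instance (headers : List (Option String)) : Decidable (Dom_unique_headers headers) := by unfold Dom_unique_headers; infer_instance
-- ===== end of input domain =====

-- B replaces A's single stateful pass with a running counter by two staged passes: a position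
-- table (text -> list of indices) built first, then a group-wise fill of a pre-sized output
-- by index assignment; return values agree everywhere (alternative decomposition, same O(n)).

-- ===== PORT A =====
-- str(header) on a str is the identity, so `text = str(header)` is `text = s` for `some s`.
-- `suffix = seen[text]; seen[text] += 1` on a defaultdict(int): read with default 0, store suffix+1.
def unique_headers (headers : List (Option String)) : List (Option String) :=
  (headers.foldl
    (fun (st : PySem.Dict String Int × List (Option String)) header =>
      match header with
      | none => (st.1, st.2 ++ [none])
      | some text =>
        let suffix := st.1.getD text 0
        let seen := st.1.insert text (suffix + 1)
        (seen, st.2 ++ [some (if suffix = 0 then text else text ++ "_" ++ PySem.Int.toStr suffix)]))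
    (PySem.Dict.empty, [])).2

-- ===== PORT B =====
-- `groups[str(header)].append(i)` on a defaultdict(list): read d[text] with default [],
-- append i in place — Dict.modify text [] (· ++ [i]).
def uhGroups (headers : List (Option String)) : PySem.Dict String (List Int) :=
  (PySem.List.enumerate headers).foldl
    (fun d p =>
      match p.2 with
      | none => d
      | some text => d.modify text [] (fun v => v ++ [p.1]))
    PySem.Dict.empty

-- `out = [None] * len(headers)`, then `for text, positions in groups.items(): for j, p in
-- enumerate(positions): out[p] = …`; `out[p] = v` is PySem.List.pySetD (p is a nonnegative
-- in-range enumerate index, where pySetD is exact).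
def unique_headers_alt (headers : List (Option String)) : List (Option String) :=
  (uhGroups headers).items.foldl
    (fun out item =>
      (PySem.List.enumerate item.2).foldl
        (fun out q =>
          PySem.List.pySetD out q.2
            (some (if q.1 = 0 then item.1 else item.1 ++ "_" ++ PySem.Int.toStr q.1)))
        out)
    (List.replicate headers.length none)

-- ===== PRECONDITION & SPEC =====
def Spec_unique_headers (headers : List (Option String)) (out : List (Option String)) : Prop := out = unique_headers_alt headers
instance (headers : List (Option String)) (out : List (Option String)) : Decidable (Spec_unique_headers headers out) := by unfold Spec_unique_headers; infer_instance

-- ===== CLAIM =====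
def Claim_equal_unique_headers : Prop := ∀ (headers : List (Option String)), Dom_unique_headers headers → Spec_unique_headers headers (unique_headers headers)

-- ===== LEMMAS AND PROOFS =====

-- Proof-side spec: number of occurrences of `some t` in the already-processed prefix.
def uhCount (pfx : List (Option String)) (t : String) : Int :=
  ((pfx.count (some t) : Nat) : Int)

-- Proof-side spec: the emitted header name for base `s` with `c` earlier duplicates.
def uhVal (s : String) (c : Int) : String :=
  if c = 0 then s else s ++ "_" ++ PySem.Int.toStr c

-- Proof-side spec: the output, computed per element from its prefix.
def uhGo (pfx rest : List (Option String)) : List (Option String) :=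
  match rest with
  | [] => []
  | header :: tail =>
    match header with
    | none => none :: uhGo (pfx ++ [header]) tail
    | some text => some (uhVal text (uhCount pfx text)) :: uhGo (pfx ++ [header]) tail

-- Proof-side spec: the positions at which `some t` occurs.
def uhPos (t : String) (hs : List (Option String)) : List Int :=
  ((PySem.List.enumerate hs).filter (fun p => p.2 == some t)).map (fun p => p.1)

theorem uhCount_append_none (pfx : List (Option String)) (t : String) :
    uhCount (pfx ++ [none]) t = uhCount pfx t := by
  simp [uhCount, List.count_append]

theorem uhCount_append_some (pfx : List (Option String)) (s t : String) :
    uhCount (pfx ++ [some s]) t = if s = t then uhCount pfx t + 1 else uhCount pfx t := by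
  by_cases h : s = t <;> simp [uhCount, List.count_append, h]

-- A's forward loop with the running counter equals the prefix-count spec.
theorem uh_loop_eq (rest : List (Option String)) :
    ∀ (seen : PySem.Dict String Int) (out pfx : List (Option String)),
      (∀ t, seen.getD t 0 = uhCount pfx t) →
      (rest.foldl
        (fun (st : PySem.Dict String Int × List (Option String)) header =>
          match header with
          | none => (st.1, st.2 ++ [none])
          | some text =>
            let suffix := st.1.getD text 0
            let seen := st.1.insert text (suffix + 1)
            (seen, st.2 ++ [some (if suffix = 0 then text else text ++ "_" ++ PySem.Int.toStr suffix)]))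
        (seen, out)).2 = out ++ uhGo pfx rest := by
  induction rest with
  | nil => intro seen out pfx _; simp [uhGo]
  | cons header tail ih =>
    intro seen out pfx hinv
    cases header with
    | none =>
      simp only [List.foldl, uhGo]
      rw [ih seen (out ++ [none]) (pfx ++ [none])
        (fun t => by rw [hinv t, uhCount_append_none])]
      simp
    | some text =>
      simp only [List.foldl, uhGo, hinv text]
      rw [ih _ _ (pfx ++ [some text]) (fun t => by
        rw [PySem.Dict.getD_insert, uhCount_append_some]
        by_cases h : text = t
        · simp [h]
        · simp [h, Ne.symm h, hinv t])]
      simp [uhVal]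

-- The per-prefix spec equals a map over the enumerated list with prefix counts.
theorem uhGo_eq_map (rest : List (Option String)) :
    ∀ (pfx : List (Option String)),
      uhGo pfx rest = (PySem.List.enumerate rest (pfx.length : Int)).map
        (fun p => p.2.map (fun t => uhVal t (uhCount ((pfx ++ rest).take p.1.toNat) t))) := by
  induction rest with
  | nil => intro pfx; simp [uhGo, PySem.List.enumerate_nil]
  | cons h tl ih =>
    intro pfx
    rw [PySem.List.enumerate_cons, List.map_cons]
    have hpfx : ((pfx.length : Int)).toNat = pfx.length := by simp
    have htake : (pfx ++ h :: tl).take pfx.length = pfx := by simp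
    have hrec : uhGo (pfx ++ [h]) tl = (PySem.List.enumerate tl ((pfx.length : Int) + 1)).map
        (fun p => p.2.map (fun t => uhVal t (uhCount ((pfx ++ h :: tl).take p.1.toNat) t))) := by
      rw [ih (pfx ++ [h])]
      have hlen : (((pfx ++ [h]).length : Nat) : Int) = (pfx.length : Int) + 1 := by simp
      rw [hlen]
      have happ : (pfx ++ [h]) ++ tl = pfx ++ h :: tl := by simp
      rw [happ]
    cases h with
    | none => simp only [uhGo, hrec]; rfl
    | some s =>
      simp only [uhGo, hrec, hpfx, htake]
      rfl

-- uhPos membership: position i carries header `some t`.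
theorem mem_uhPos (t : String) (hs : List (Option String)) (i : Int) :
    i ∈ uhPos t hs ↔ ∃ (k : Nat) (h : k < hs.length), i = (k : Int) ∧ hs[k] = some t := by
  unfold uhPos
  simp only [List.mem_map, List.mem_filter]
  constructor
  · rintro ⟨p, ⟨hp, hq⟩, rfl⟩
    obtain ⟨k, hk, rfl⟩ := (PySem.List.mem_enumerate_iff hs 0 p).1 hp
    exact ⟨k, hk, by simp, by simpa using hq⟩
  · rintro ⟨k, hk, rfl, hh⟩
    refine ⟨((k : Int), hs[k]), ⟨?_, by simp [hh]⟩, rfl⟩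
    exact (PySem.List.mem_enumerate_iff hs 0 _).2 ⟨k, hk, by simp⟩

theorem uhPos_bound (t : String) (hs : List (Option String)) (i : Int) (h : i ∈ uhPos t hs) :
    0 ≤ i ∧ i < (hs.length : Int) := by
  obtain ⟨k, hk, rfl, _⟩ := (mem_uhPos t hs i).1 h
  constructor <;> omega

theorem uhPos_nodup (t : String) (hs : List (Option String)) : (uhPos t hs).Nodup := by
  have h1 : (PySem.List.enumerate hs).Pairwise (fun p q => p.1 < q.1) :=
    PySem.List.pairwise_lt_enumerate hs 0
  have h2 : ((PySem.List.enumerate hs).filter (fun p => p.2 == some t)).Pairwise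
      (fun p q => p.1 < q.1) := h1.filter _
  unfold uhPos
  have h3 : (((PySem.List.enumerate hs).filter (fun p => p.2 == some t)).map
      (fun p => p.1)).Pairwise (fun a b => a < b) := List.pairwise_map.mpr h2
  exact h3.imp (fun {a b} h => by omega)

-- uhPos over a snoc.
theorem uhPos_append (t : String) (hs : List (Option String)) (x : Option String) :
    uhPos t (hs ++ [x]) = uhPos t hs ++ (if x = some t then [(hs.length : Int)] else []) := by
  unfold uhPos
  rw [PySem.List.enumerate_append]
  by_cases hx : x = some t <;>
    simp [PySem.List.enumerate_cons, PySem.List.enumerate_nil, List.filter_append, hx]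

-- Length of uhPos is the occurrence count.
theorem uhPos_length (t : String) (hs : List (Option String)) :
    ((uhPos t hs).length : Int) = uhCount hs t := by
  induction hs using List.reverseRecOn with
  | nil => simp [uhPos, uhCount, PySem.List.enumerate_nil]
  | append_singleton init x ih =>
    rw [uhPos_append]
    by_cases hx : x = some t
    · subst hx
      rw [if_pos rfl, uhCount_append_some init t t, if_pos rfl]
      have hI := ih
      simp only [List.length_append, List.length_cons, List.length_nil, Nat.cast_add,
        Nat.cast_one]
      omega
    · cases x with
      | none => rw [uhCount_append_none]; simpa [hx] using ih
      | some s =>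
        have hst : s ≠ t := fun h => hx (by rw [h])
        rw [uhCount_append_some, if_neg hst]
        simpa [hx] using ih

-- Rank in uhPos = number of earlier occurrences.
theorem uhPos_rank (hs : List (Option String)) (k : Nat) (hk : k < hs.length) (t : String)
    (hh : hs[k] = some t) :
    (((uhPos t hs).idxOf (k : Int) : Nat) : Int) = uhCount (hs.take k) t := by
  induction hs using List.reverseRecOn with
  | nil => simp at hk
  | append_singleton init x ih =>
    rw [uhPos_append]
    rcases Nat.lt_or_ge k init.length with hlt | hge
    · have hh' : init[k] = some t := by
        rw [← hh]; exact (List.getElem_append_left hlt).symm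
      have hmem : (k : Int) ∈ uhPos t init := (mem_uhPos t init _).2 ⟨k, hlt, rfl, hh'⟩
      rw [List.idxOf_append_of_mem hmem]
      rw [List.take_append_of_le_length (by omega)]
      exact ih hlt hh'
    · have hk' : k = init.length := by
        have := hk; simp at this; omega
      subst hk'
      have hx : x = some t := by
        have : (init ++ [x])[init.length] = x := by simp
        rw [← this, hh]
      rw [if_pos hx]
      have hnm : ((init.length : Int)) ∉ uhPos t init := by
        intro hmem
        have := uhPos_bound t init _ hmem
        omega
      rw [List.idxOf_append_of_notMem hnm]
      simp only [List.idxOf_cons_self]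
      rw [List.take_append_of_le_length (le_refl _), List.take_length]
      rw [← uhPos_length t init]
      simp

-- The grouping loop's table maps each text to its position list.
theorem uhGroups_getD_aux (l : List (Int × Option String)) :
    ∀ (d : PySem.Dict String (List Int)) (t : String),
      (l.foldl
        (fun d p =>
          match p.2 with
          | none => d
          | some text => d.modify text [] (fun v => v ++ [p.1])) d).getD t [] =
      d.getD t [] ++ ((l.filter (fun p => p.2 == some t)).map (fun p => p.1)) := by
  induction l with
  | nil => intro d t; simp
  | cons p tl ih =>
    intro d t
    cases hp : p.2 with
    | none => simp only [List.foldl, hp]; rw [ih]; simp [hp]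
    | some s =>
      simp only [List.foldl, hp]
      rw [ih]
      rw [PySem.Dict.getD_modify]
      by_cases hts : t = s
      · subst hts; simp [hp]
      · simp [hp, hts, Ne.symm hts]

theorem uhGroups_getD (headers : List (Option String)) (t : String) :
    (uhGroups headers).getD t [] = uhPos t headers := by
  unfold uhGroups uhPos
  rw [uhGroups_getD_aux]
  simp [PySem.Dict.getD_empty]

-- The grouping loop's keys are nodup.
theorem uhGroups_nodup_keys_aux (l : List (Int × Option String)) :
    ∀ (d : PySem.Dict String (List Int)), d.keys.Nodup →
      (l.foldl
        (fun d p =>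
          match p.2 with
          | none => d
          | some text => d.modify text [] (fun v => v ++ [p.1])) d).keys.Nodup := by
  induction l with
  | nil => intro d hd; simpa using hd
  | cons p tl ih =>
    intro d hd
    cases hp : p.2 with
    | none => simp only [List.foldl, hp]; exact ih d hd
    | some s =>
      simp only [List.foldl, hp]
      refine ih _ ?_
      have : (d.modify s [] (fun v => v ++ [p.1])).keys = (d.insert s (((d.getD s [])) ++ [p.1])).keys :=
        PySem.Dict.keys_modify d s [] _
      rw [this]
      exact PySem.Dict.nodup_keys_insert d s _ hd

theorem uhGroups_nodup_keys (headers : List (Option String)) :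
    (uhGroups headers).keys.Nodup := by
  unfold uhGroups
  exact uhGroups_nodup_keys_aux _ PySem.Dict.empty (PySem.Dict.nodup_keys_empty)

-- Every occurring text is a key of the table.
theorem uhGroups_contains_aux (l : List (Int × Option String)) :
    ∀ (d : PySem.Dict String (List Int)) (t : String),
      (l.foldl
        (fun d p =>
          match p.2 with
          | none => d
          | some text => d.modify text [] (fun v => v ++ [p.1])) d).contains t =
      (d.contains t || l.any (fun p => p.2 == some t)) := by
  induction l with
  | nil => intro d t; simp
  | cons p tl ih =>
    intro d t
    cases hp : p.2 with
    | none => simp only [List.foldl, hp]; rw [ih]; simp [hp]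
    | some s =>
      simp only [List.foldl, hp]
      rw [ih, PySem.Dict.contains_modify]
      have hts : (t == s) = (s == t) := by
        by_cases h : t = s
        · simp [h]
        · have h' : s ≠ t := fun hh => h hh.symm
          simp [h, h']
      simp only [List.any_cons, hp, hts]
      ac_rfl

theorem uhGroups_contains (headers : List (Option String)) (k : Nat) (hk : k < headers.length)
    (t : String) (hh : headers[k] = some t) :
    (uhGroups headers).contains t = true := by
  unfold uhGroups
  rw [uhGroups_contains_aux]
  have : (PySem.List.enumerate headers).any (fun p => p.2 == some t) = true := by
    rw [List.any_eq_true]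
    refine ⟨((k : Int), headers[k]), ?_, by simp [hh]⟩
    exact (PySem.List.mem_enumerate_iff headers 0 _).2 ⟨k, hk, by simp⟩
  simp [this]

-- The inner fill loop preserves length.
theorem uh_inner_len (v : List Int) :
    ∀ (s : Int) (out : List (Option String)) (t : String),
      ((PySem.List.enumerate v s).foldl
        (fun out q => PySem.List.pySetD out q.2
          (some (if q.1 = 0 then t else t ++ "_" ++ PySem.Int.toStr q.1))) out).length
      = out.length := by
  induction v with
  | nil => intro s out t; simp [PySem.List.enumerate_nil]
  | cons i v ih =>
    intro s out t
    rw [PySem.List.enumerate_cons, List.foldl_cons, ih]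
    exact PySem.List.length_pySetD _ _ _

-- The inner fill loop, element-wise: position i of v gets rank s + idxOf.
theorem uh_inner (v : List Int) :
    ∀ (s : Int) (out : List (Option String)) (t : String),
      v.Nodup → (∀ i ∈ v, 0 ≤ i ∧ i < (out.length : Int)) →
      ∀ (m : Nat),
      ((PySem.List.enumerate v s).foldl
        (fun out q => PySem.List.pySetD out q.2
          (some (if q.1 = 0 then t else t ++ "_" ++ PySem.Int.toStr q.1))) out)[m]? =
      if (m : Int) ∈ v then some (some (uhVal t (s + ((v.idxOf (m : Int) : Nat) : Int))))
      else out[m]? := by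
  induction v with
  | nil => intro s out t _ _ m; simp [PySem.List.enumerate_nil]
  | cons i v ih =>
    intro s out t hnd hbd m
    rw [PySem.List.enumerate_cons, List.foldl_cons]
    have hi0 : 0 ≤ i := (hbd i (by simp)).1
    have hilen : i < (out.length : Int) := (hbd i (by simp)).2
    have hset : PySem.List.pySetD out i (some (if s = 0 then t else t ++ "_" ++ PySem.Int.toStr s))
        = out.set i.toNat (some (uhVal t s)) := by
      rw [PySem.List.pySetD_of_nonneg out _ hi0]; rfl
    have hlen' : (out.set i.toNat (some (uhVal t s))).length = out.length := by simp
    rw [hset, ih (s + 1) _ t hnd.of_cons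
      (fun j hj => by rw [hlen']; exact hbd j (by simp [hj])) m]
    have hinv : i ∉ v := (List.nodup_cons.1 hnd).1
    by_cases hm : (m : Int) ∈ v
    · have hmi : (m : Int) ≠ i := fun h => hinv (h ▸ hm)
      rw [if_pos hm, if_pos (by simp [hm])]
      rw [List.idxOf_cons_ne v (Ne.symm hmi)]
      have : s + 1 + ((v.idxOf (m : Int) : Nat) : Int)
          = s + (((v.idxOf (m : Int) + 1 : Nat) : Nat) : Int) := by push_cast; ring
      rw [this]
    · rw [if_neg hm]
      by_cases hmi : (m : Int) = i
      · have hmt : i.toNat = m := by omega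
        rw [if_pos (by simp [hmi])]
        have hml : m < out.length := by omega
        rw [hmt, List.getElem?_set_self hml]
        rw [show ((i :: v).idxOf (m : Int)) = 0 from by
          rw [hmi]; exact List.idxOf_cons_self]
        norm_num
      · rw [if_neg (by simp [hm, hmi]),
          List.getElem?_set_ne (by omega)]

-- The outer loop over the table's items, element-wise.
theorem uh_outer (hs : List (Option String)) (its : List (String × List Int)) :
    ∀ (out : List (Option String)),
      out.length = hs.length →
      (∀ it ∈ its, it.2 = uhPos it.1 hs) →
      (its.map Prod.fst).Nodup →
      ∀ (m : Nat), m < hs.length →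
      ((its.foldl
        (fun out item =>
          (PySem.List.enumerate item.2).foldl
            (fun out q => PySem.List.pySetD out q.2
              (some (if q.1 = 0 then item.1 else item.1 ++ "_" ++ PySem.Int.toStr q.1))) out)
        out)[m]?) =
      (hs[m]!).elim (out[m]?)
        (fun t => if t ∈ its.map Prod.fst
          then some (some (uhVal t (uhCount (hs.take m) t))) else out[m]?) := by
  induction its with
  | nil =>
    intro out _ _ _ m hm
    cases hs[m]! <;> simp
  | cons it its ih =>
    intro out hlen hpos hnd m hm
    rw [List.foldl_cons]
    have hit : it.2 = uhPos it.1 hs := hpos it (by simp)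
    have hbd : ∀ i ∈ it.2, 0 ≤ i ∧ i < (out.length : Int) := by
      intro i hi
      rw [hlen]
      exact uhPos_bound it.1 hs i (hit ▸ hi)
    have hnd2 : it.2.Nodup := hit ▸ uhPos_nodup it.1 hs
    have hlen' : ((PySem.List.enumerate it.2).foldl
        (fun out q => PySem.List.pySetD out q.2
          (some (if q.1 = 0 then it.1 else it.1 ++ "_" ++ PySem.Int.toStr q.1))) out).length
        = hs.length := by rw [uh_inner_len, hlen]
    rw [ih _ hlen' (fun j hj => hpos j (by simp [hj])) (List.nodup_cons.1 hnd).2 m hm]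
    have hgm : hs[m]! = hs[m] := getElem!_pos hs m hm
    rw [uh_inner it.2 0 out it.1 hnd2 hbd m, hgm]
    cases hh : hs[m] with
    | none =>
      simp only [Option.elim_none]
      have hnm : (m : Int) ∉ it.2 := by
        rw [hit]
        intro hmem
        obtain ⟨k, hk, hki, hkv⟩ := (mem_uhPos it.1 hs _).1 hmem
        have hkm : k = m := by omega
        subst hkm
        rw [hh] at hkv
        simp at hkv
      rw [if_neg hnm]
    | some t =>
      simp only [Option.elim_some]
      by_cases ht : t = it.1
      · rw [ht] at hh ⊢
        have hmem : (m : Int) ∈ it.2 := by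
          rw [hit]; exact (mem_uhPos it.1 hs _).2 ⟨m, hm, rfl, hh⟩
        have hnin : it.1 ∉ its.map Prod.fst := by
          have := (List.nodup_cons.1 hnd).1
          simpa using this
        rw [if_neg hnin, if_pos hmem,
          if_pos (show it.1 ∈ List.map Prod.fst (it :: its) from by
            rw [List.map_cons]; exact List.mem_cons_self ..)]
        have hrank : ((it.2.idxOf (m : Int) : Nat) : Int) = uhCount (hs.take m) it.1 := by
          rw [hit]; exact uhPos_rank hs m hm it.1 hh
        rw [zero_add, hrank]
      · have hnm : (m : Int) ∉ it.2 := by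
          rw [hit]
          intro hmem
          obtain ⟨k, hk, hki, hkv⟩ := (mem_uhPos it.1 hs _).1 hmem
          have hkm : k = m := by omega
          subst hkm
          rw [hh] at hkv
          exact ht (Option.some.inj hkv)
        rw [if_neg hnm]
        by_cases htm : t ∈ its.map Prod.fst
        · rw [if_pos htm, if_pos (by simp [htm])]
        · rw [if_neg htm, if_neg (by simp [ht, htm])]

-- The whole fill phase preserves length.
theorem uh_outer_len (its : List (String × List Int)) :
    ∀ (out : List (Option String)),
      (its.foldl
        (fun out item =>
          (PySem.List.enumerate item.2).foldl
            (fun out q => PySem.List.pySetD out q.2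
              (some (if q.1 = 0 then item.1 else item.1 ++ "_" ++ PySem.Int.toStr q.1))) out)
        out).length = out.length := by
  induction its with
  | nil => intro out; rfl
  | cons it its ih =>
    intro out
    rw [List.foldl_cons, ih, uh_inner_len]

-- ===== VERDICT =====
theorem unique_headers_spec : Claim_equal_unique_headers := by
  intro hs _
  show unique_headers hs = unique_headers_alt hs
  have hA : unique_headers hs = uhGo [] hs := by
    unfold unique_headers
    rw [uh_loop_eq hs PySem.Dict.empty [] []
      (fun t => by simp [PySem.Dict.getD_empty, uhCount])]
    simp
  have hBlen : (unique_headers_alt hs).length = hs.length := by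
    unfold unique_headers_alt; rw [uh_outer_len]; simp
  have hAlen : (uhGo [] hs).length = hs.length := by
    rw [uhGo_eq_map hs []]; simp
  rw [hA]
  apply List.ext_getElem?
  intro m
  by_cases hm : m < hs.length
  · have hL : (uhGo [] hs)[m]? =
        some ((hs[m]).map (fun t => uhVal t (uhCount (hs.take m) t))) := by
      rw [uhGo_eq_map hs [], List.getElem?_map, PySem.List.getElem?_enumerate,
        List.getElem?_eq_getElem hm]
      simp
    have hitems : ∀ it ∈ (uhGroups hs).items, it.2 = uhPos it.1 hs := by
      rintro ⟨k, v⟩ hkv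
      have hnd := uhGroups_nodup_keys hs
      have hg := PySem.Dict.getD_of_mem_items (uhGroups hs) hkv hnd []
      rw [← hg, uhGroups_getD]
    have hknd : ((uhGroups hs).items.map Prod.fst).Nodup := by
      have hk : (uhGroups hs).items.map Prod.fst = (uhGroups hs).keys := rfl
      rw [hk]; exact uhGroups_nodup_keys hs
    have hR := uh_outer hs (uhGroups hs).items (List.replicate hs.length none)
      (by simp) hitems hknd m hm
    rw [getElem!_pos hs m hm] at hR
    unfold unique_headers_alt
    rw [hR, hL]
    cases hh : hs[m] with
    | none => simp [hm]
    | some t =>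
      have hcont := uhGroups_contains hs m hm t hh
      have hmemk : t ∈ (uhGroups hs).items.map Prod.fst :=
        (PySem.Dict.contains_iff_mem_keys _ t).1 hcont
      simp only [Option.elim_some, Option.map_some]
      rw [if_pos hmemk]
  · rw [List.getElem?_eq_none (by omega : (uhGo [] hs).length ≤ m),
      List.getElem?_eq_none (by omega : (unique_headers_alt hs).length ≤ m)]
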